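-- pv_equiv track=rewrite | github.com/taehuiii/algorithm | 프로그래머스/2/42626. 더 맵게/더 맵게.py | solution
-- ===== SOURCE A (Python) =====
-- import heapq
--
-- def solution(scoville, K):
--
--     cost={}
--     pq=[]
--     cnt=0
--
--     for i in scoville:
--         heapq.heappush(pq,i)
--
--     while len(pq)>=2:
--         temp = heapq.heappop(pq)
--         if(temp <K):
--             next = heapq.heappop(pq)
--             heapq.heappush(pq, temp+next*2)
--             cnt+=1
--     if heapq.heappop(pq) > K:
--         return cnt
--
--     return -1
-- ===== SOURCE B (Python) =====
-- def solution(scoville, K):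
--     # same return value as A via a plain min-scan list instead of a heap;
--     # raises IndexError on empty scoville exactly like A's final heappop
--     arr = list(scoville)
--     cnt = 0
--     while len(arr) >= 2:
--         temp = min(arr)
--         arr.remove(temp)
--         if temp < K:
--             nxt = min(arr)
--             arr.remove(nxt)
--             arr.append(temp + nxt * 2)
--             cnt += 1
--     last = arr.pop()
--     return cnt if last > K else -1
-- ===== Notes on version B (the rewrite author's own statement) =====
-- stated objective: simpler
-- what changed: Replaces the binary min-heap (heapq push/pop) with a plain list scanned by min() and mutated by remove()/append(), keeping the same mixing loop semantics.
import Mathlib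
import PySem

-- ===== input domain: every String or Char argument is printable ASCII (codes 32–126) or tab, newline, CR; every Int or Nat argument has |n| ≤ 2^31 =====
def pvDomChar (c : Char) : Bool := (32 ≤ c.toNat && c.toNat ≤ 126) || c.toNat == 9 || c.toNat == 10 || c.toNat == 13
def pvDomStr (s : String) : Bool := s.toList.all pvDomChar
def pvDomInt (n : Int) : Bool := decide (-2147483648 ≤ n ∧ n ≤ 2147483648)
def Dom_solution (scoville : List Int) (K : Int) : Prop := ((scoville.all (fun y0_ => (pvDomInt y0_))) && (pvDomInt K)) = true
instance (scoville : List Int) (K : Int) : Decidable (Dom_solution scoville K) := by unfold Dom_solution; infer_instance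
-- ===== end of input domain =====

-- B replaces A's binary heap with a plain list scanned by min(); equivalence is about the
-- return value (B copies its argument, so neither Python mutates `scoville` observably).

-- ===== PORT A =====
-- heapq on a list of Ints, modelled by keeping the heap as the sorted list of its elements:
-- exact for this program, since all heapq exposes here is the value sequence of heappop,
-- which for Int elements (ties indistinguishable) is ascending order.
def heappushA (pq : List Int) (x : Int) : List Int :=
  PySem.List.insertBy (fun a b => decide (a < b)) x pq

-- termination helper for the while-loop port (cited by `decreasing_by`)
theorem length_insertBy_int (x : Int) (ys : List Int) :
    (PySem.List.insertBy (fun a b => decide (a < b)) x ys).length = ys.length + 1 := by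
  induction ys with
  | nil => rfl
  | cons y t ih =>
    simp only [PySem.List.insertBy]
    split <;> simp [ih]

-- the `while len(pq) >= 2` loop, then the final `heappop` comparison
def loopA (K : Int) (pq : List Int) (cnt : Int) : Int :=
  match pq with
  | temp :: next :: rest =>               -- len(pq) >= 2: temp = heappop(pq)
    if temp < K then
      loopA K (heappushA rest (temp + next * 2)) (cnt + 1)   -- next = heappop; heappush
    else
      loopA K (next :: rest) cnt          -- temp discarded, loop continues
  | [temp] =>                             -- loop exits; heappop(pq) = temp
    if temp > K then cnt else -1
  | [] => -1                              -- Python raises IndexError here; excluded by Pre_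
termination_by pq.length
decreasing_by
  · simp [heappushA, length_insertBy_int]
  · simp

def solution (scoville : List Int) (K : Int) : Int :=
  let pq := scoville.foldl heappushA []   -- for i in scoville: heapq.heappush(pq, i)
  loopA K pq 0

-- ===== PORT B =====
theorem length_of_remove?_some (xs r : List Int) (v : Int)
    (h : PySem.List.remove? xs v = some r) : r.length + 1 = xs.length := by
  induction xs generalizing r with
  | nil => simp [PySem.List.remove?] at h
  | cons x t ih =>
    by_cases hx : x = v
    · subst hx; rw [PySem.List.remove?_cons_self] at h
      cases h; simp
    · rw [PySem.List.remove?_cons_of_ne t hx] at h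
      cases hr : PySem.List.remove? t v with
      | none => rw [hr] at h; simp at h
      | some r' =>
        rw [hr] at h; simp at h
        subst h; simp [← ih r' hr]

-- the `while len(arr) >= 2` loop, then `last = arr.pop()` and the final comparison
def loopB (K : Int) (arr : List Int) (cnt : Int) : Int :=
  if _h : 2 ≤ arr.length then
    -- temp = min(arr) is (PySem.List.min? arr (fun x => x)).getD 0 (arr ≠ [] here)
    match h1 : PySem.List.remove? arr ((PySem.List.min? arr (fun x => x)).getD 0) with
    | none => -1            -- unreachable: min(arr) ∈ arr
    | some arr1 =>
      if (PySem.List.min? arr (fun x => x)).getD 0 < K then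
        -- nxt = min(arr) is (PySem.List.min? arr1 (fun x => x)).getD 0 (arr1 ≠ [] here)
        match h2 : PySem.List.remove? arr1 ((PySem.List.min? arr1 (fun x => x)).getD 0) with
        | none => -1        -- unreachable: min(arr) ∈ arr
        | some arr2 =>
          loopB K (arr2 ++ [(PySem.List.min? arr (fun x => x)).getD 0
            + (PySem.List.min? arr1 (fun x => x)).getD 0 * 2]) (cnt + 1)   -- arr.append(...)
      else
        loopB K arr1 cnt
  else
    match arr.getLast? with
    | some last => if last > K then cnt else -1                       -- last = arr.pop()
    | none => -1                            -- Python raises IndexError here; excluded by Pre_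
termination_by arr.length
decreasing_by
  · have g1 := length_of_remove?_some arr arr1 _ h1
    have g2 := length_of_remove?_some arr1 arr2 _ h2
    simp only [List.length_append, List.length_cons, List.length_nil]
    omega
  · have g1 := length_of_remove?_some arr arr1 _ h1
    omega

def solution_alt (scoville : List Int) (K : Int) : Int :=
  loopB K scoville 0                       -- arr = list(scoville)

-- ===== PRECONDITION & SPEC =====
-- Pre_ excludes only the empty list, on which both Pythons raise IndexError at the final pop.
def Pre_solution (scoville : List Int) (K : Int) : Prop := scoville ≠ []
instance (scoville : List Int) (K : Int) : Decidable (Pre_solution scoville K) := by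
  unfold Pre_solution; infer_instance

def pvWitness_solution : List Int × Int := ([1, 2, 3, 9, 10, 12], 7)

def Spec_solution (scoville : List Int) (K : Int) (out : Int) : Prop := out = solution_alt scoville K
instance (scoville : List Int) (K : Int) (out : Int) : Decidable (Spec_solution scoville K out) := by
  unfold Spec_solution; infer_instance

-- ===== CLAIM (what is proved, stated in full; the proofs are below) =====
def Claim_equal_solution : Prop := ∀ (scoville : List Int) (K : Int), Dom_solution scoville K → Pre_solution scoville K → Spec_solution scoville K (solution scoville K)

-- ===== LEMMAS AND PROOFS =====

-- heappushA's result is a permutation of consing the new element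
theorem perm_heappushA (x : Int) (ys : List Int) : (heappushA ys x).Perm (x :: ys) := by
  induction ys with
  | nil => exact List.Perm.refl _
  | cons y t ih =>
    simp only [heappushA, PySem.List.insertBy] at *
    split
    · exact List.Perm.refl _
    · exact (ih.cons y).trans (List.Perm.swap x y t)

-- heappushA keeps the heap-model list sorted
theorem pairwise_heappushA (x : Int) (ys : List Int) (h : ys.Pairwise (· ≤ ·)) :
    (heappushA ys x).Pairwise (· ≤ ·) := by
  induction ys with
  | nil => simp [heappushA, PySem.List.insertBy]
  | cons y t ih =>
    rcases List.pairwise_cons.mp h with ⟨hy, ht⟩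
    simp only [heappushA, PySem.List.insertBy] at *
    split
    · rename_i hxy
      simp only [decide_eq_true_eq] at hxy
      refine List.pairwise_cons.mpr ⟨?_, h⟩
      intro b hb
      rcases List.mem_cons.mp hb with rfl | hb'
      · omega
      · exact le_trans (le_of_lt hxy) (hy _ hb')
    · rename_i hxy
      simp only [decide_eq_true_eq] at hxy
      refine List.pairwise_cons.mpr ⟨?_, ih ht⟩
      intro b hb
      rcases (PySem.List.mem_insertBy _ x b t).mp hb with rfl | hb'
      · omega
      · exact hy _ hb'

-- min() over any permutation of a sorted nonempty list is its head
theorem min_getD_head (temp : Int) (t arr : List Int)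
    (hperm : (temp :: t).Perm arr) (hsort : (temp :: t).Pairwise (· ≤ ·)) :
    (PySem.List.min? arr (fun x => x)).getD 0 = temp := by
  have harrne : arr ≠ [] := by
    intro hnil; subst hnil
    exact absurd hperm.length_eq (by simp)
  obtain ⟨m, hm⟩ : ∃ m, PySem.List.min? arr (fun x => x) = some m := by
    cases hmin : PySem.List.min? arr (fun x => x) with
    | none => exact absurd ((PySem.List.min?_eq_none_iff arr _).mp hmin) harrne
    | some m => exact ⟨m, rfl⟩
  rw [hm, Option.getD_some]
  have hmemarr : temp ∈ arr := hperm.mem_iff.mp (List.mem_cons_self ..)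
  have h1 : m ≤ temp := PySem.List.min?_isMin hm temp hmemarr
  have hmempq : m ∈ temp :: t := hperm.mem_iff.mpr (PySem.List.min?_mem hm)
  rcases List.mem_cons.mp hmempq with h | h
  · omega
  · have := (List.pairwise_cons.mp hsort).1 m h
    omega

-- the core invariant: A's sorted-heap loop = B's min-scan loop on any permutation
theorem loop_eq (K : Int) (n : Nat) : ∀ (pq arr : List Int) (cnt : Int),
    pq.length = n → pq.Perm arr → pq.Pairwise (· ≤ ·) →
    loopA K pq cnt = loopB K arr cnt := by
  induction n using Nat.strong_induction_on with
  | _ n ih =>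
    intro pq arr cnt hlen hperm hsort
    match pq with
    | [] =>
      have : arr = [] := hperm.symm.eq_nil
      subst this
      rw [loopA, loopB]
      simp
    | [temp] =>
      have : arr = [temp] := List.perm_singleton.mp hperm.symm
      subst this
      rw [loopA, loopB]
      simp
    | temp :: next :: rest =>
      have hlen2 : 2 ≤ arr.length := by
        rw [← hperm.length_eq]; simp
      have hm1 : (PySem.List.min? arr (fun x => x)).getD 0 = temp :=
        min_getD_head temp (next :: rest) arr hperm hsort
      have hmemarr : temp ∈ arr := hperm.mem_iff.mp (List.mem_cons_self ..)
      have hrm1 : PySem.List.remove? arr temp = some (arr.erase temp) :=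
        PySem.List.remove?_eq_some_erase arr temp hmemarr
      have hperm1 : (next :: rest).Perm (arr.erase temp) := by
        have := hperm.erase temp
        rwa [List.erase_cons_head] at this
      have hsort1 : (next :: rest).Pairwise (· ≤ ·) := hsort.of_cons
      rw [loopA, loopB, dif_pos hlen2]
      have hm2 : (PySem.List.min? (arr.erase temp) (fun x => x)).getD 0 = next :=
        min_getD_head next rest (arr.erase temp) hperm1 hsort1
      have hmemarr1 : next ∈ arr.erase temp := hperm1.mem_iff.mp (List.mem_cons_self ..)
      have hrm2 : PySem.List.remove? (arr.erase temp) next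
          = some ((arr.erase temp).erase next) :=
        PySem.List.remove?_eq_some_erase _ next hmemarr1
      have hperm2 : rest.Perm ((arr.erase temp).erase next) := by
        have := hperm1.erase next
        rwa [List.erase_cons_head] at this
      have hn : n = rest.length + 2 := by simp at hlen; omega
      by_cases hK : temp < K
      · rw [if_pos hK]
        split
        · rename_i heq; rw [hm1, hrm1] at heq; cases heq
        · rename_i arr1 heq
          rw [hm1, hrm1] at heq; injection heq with heq; subst heq
          rw [if_pos (hm1 ▸ hK : (PySem.List.min? arr (fun x => x)).getD 0 < K)]
          split
          · rename_i heq2; rw [hm2, hrm2] at heq2; cases heq2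
          · rename_i arr2 heq2
            rw [hm2, hrm2] at heq2; injection heq2 with heq2; subst heq2
            rw [hm1, hm2]
            refine ih (rest.length + 1) (by omega) _ _ (cnt + 1) ?_ ?_ ?_
            · simp [heappushA, length_insertBy_int]
            · refine (perm_heappushA _ rest).trans ?_
              refine ((hperm2.cons _).trans ?_)
              exact (List.perm_append_singleton _ _).symm
            · exact pairwise_heappushA _ rest hsort1.of_cons
      · rw [if_neg hK]
        split
        · rename_i heq; rw [hm1, hrm1] at heq; cases heq
        · rename_i arr1 heq
          rw [hm1, hrm1] at heq; injection heq with heq; subst heq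
          rw [if_neg (fun hc => hK (hm1 ▸ hc))]
          refine ih (rest.length + 1) (by omega) _ _ cnt ?_ hperm1 hsort1
          simp

-- ===== VERDICT (by name: the statement is the Claim_ definition above) =====
theorem solution_spec : Claim_equal_solution := by
  intro scoville K _ _
  unfold Spec_solution solution solution_alt
  have hpq : scoville.foldl heappushA [] = PySem.List.sorted scoville (fun x => x) false := by
    rw [PySem.List.sorted_eq_foldl_insertBy]
    rfl
  rw [hpq]
  refine loop_eq K _ _ scoville 0 rfl (PySem.List.sorted_perm ..) ?_
  exact PySem.List.sorted_pairwise scoville (fun x => x)
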